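-- pv_equiv track=rewrite | github.com/samnaveenkumaroff/CuraOS | src/clustering/page_cluster.py | _generate_cluster_labels
-- ===== SOURCE A (Python) =====
-- def _generate_cluster_labels(pages, cluster_labels):
--     """Auto-label clusters based on medical keywords"""
--     labels = {}
--     unique_clusters = set(cluster_labels)
--
--     # Medical context patterns
--     label_rules = [
--         (['lab', 'result', 'test'], 'Lab Reports'),
--         (['medication', 'prescription', 'dose'], 'Prescriptions'),
--         (['diagnosis', 'assessment'], 'Clinical Diagnosis'),
--         (['procedure', 'operation'], 'Medical Procedures'),
--         (['history', 'background'], 'Patient History')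
--     ]
--
--     for cluster_id in unique_clusters:
--         if cluster_id == -1:  # Skip noise
--             continue
--
--         cluster_texts = [pages[i] for i, cid in enumerate(cluster_labels)
--                        if cid == cluster_id]
--
--         # Find matching label
--         label = 'General Notes'
--         for keywords, potential_label in label_rules:
--             if any(any(kw in text.lower() for kw in keywords)
--                  for text in cluster_texts):
--                 label = potential_label
--                 break
--
--         labels[cluster_id] = label
--
--     return labels
-- ===== SOURCE B (Python) =====
-- # B: one pass over the pages, tracking per cluster the minimum matching rule index.
-- _LABEL_RULES = [
--     (['lab', 'result', 'test'], 'Lab Reports'),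
--     (['medication', 'prescription', 'dose'], 'Prescriptions'),
--     (['diagnosis', 'assessment'], 'Clinical Diagnosis'),
--     (['procedure', 'operation'], 'Medical Procedures'),
--     (['history', 'background'], 'Patient History')
-- ]
--
-- def _generate_cluster_labels(pages, cluster_labels):
--     nrules = len(_LABEL_RULES)
--     best = {}  # cluster_id -> minimal matching rule index (nrules = no match)
--     for i, cid in enumerate(cluster_labels):
--         if cid == -1:
--             continue
--         text = pages[i].lower()
--         r = nrules
--         for j, (keywords, _) in enumerate(_LABEL_RULES):
--             if any(kw in text for kw in keywords):
--                 r = j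
--                 break
--         if cid not in best or r < best[cid]:
--             best[cid] = r
--     return {cid: (_LABEL_RULES[r][1] if r < nrules else 'General Notes')
--             for cid, r in best.items()}
-- ===== Notes on version B (the rewrite author's own statement) =====
-- stated objective: faster
-- what changed: Instead of re-scanning all pages for every distinct cluster id (and re-running the rule matcher over each cluster's whole text list), B makes a single pass over the pages, computing each page's first-matching rule index once and keeping per cluster the minimum rule index in a dict, then maps indices to label names.
import Mathlib
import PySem

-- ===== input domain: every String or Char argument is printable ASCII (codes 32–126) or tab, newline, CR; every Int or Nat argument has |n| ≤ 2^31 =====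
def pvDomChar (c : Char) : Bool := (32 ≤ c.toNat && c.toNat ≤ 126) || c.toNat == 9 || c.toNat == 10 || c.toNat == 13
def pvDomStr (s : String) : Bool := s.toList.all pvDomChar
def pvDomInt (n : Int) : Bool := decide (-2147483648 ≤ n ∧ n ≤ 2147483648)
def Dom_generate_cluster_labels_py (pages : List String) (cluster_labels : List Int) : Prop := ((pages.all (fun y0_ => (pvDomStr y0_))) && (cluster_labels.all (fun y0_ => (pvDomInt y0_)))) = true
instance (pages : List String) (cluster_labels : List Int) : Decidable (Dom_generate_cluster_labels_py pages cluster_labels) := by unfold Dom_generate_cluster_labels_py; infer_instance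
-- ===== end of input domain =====

-- B replaces A's per-cluster rescans of all pages by a single pass tracking, per cluster,
-- the minimum matching rule index; equal return value proved on Pre_ (where Python A returns).

-- the module-level label_rules table (shared constant of both Pythons)
def pvRules : List (List String × String) :=
  [(["lab", "result", "test"], "Lab Reports"),
   (["medication", "prescription", "dose"], "Prescriptions"),
   (["diagnosis", "assessment"], "Clinical Diagnosis"),
   (["procedure", "operation"], "Medical Procedures"),
   (["history", "background"], "Patient History")]

-- ===== PORT A =====
-- A's inner rule loop: label = 'General Notes'; for keywords, lbl in rules: if any(any(kw in text.lower() …)): label = lbl; break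
def pvFirstLabel : List (List String × String) → List String → String
  | [], _ => "General Notes"
  | (kws, lbl) :: rest, texts =>
    if texts.any (fun t => kws.any (fun kw => PySem.Str.isIn kw (PySem.Str.lower t))) then lbl
    else pvFirstLabel rest texts

-- pages[i] is ported as pyGetD pages i ""; the "" default is unreachable under Pre_ (Python raises IndexError there)
def generate_cluster_labels_py (pages : List String) (cluster_labels : List Int) : List (Int × String) :=
  let unique_clusters := PySem.Set.ofList cluster_labels
  let labels := unique_clusters.foldl
    (fun (labels : PySem.Dict Int String) cluster_id =>
      if cluster_id = -1 then labels
      else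
        let cluster_texts := ((PySem.List.enumerate cluster_labels).filter (fun p => p.2 == cluster_id)).map
          (fun p => PySem.List.pyGetD pages p.1 "")
        labels.insert cluster_id (pvFirstLabel pvRules cluster_texts))
    PySem.Dict.empty
  labels.items

-- ===== PORT B =====
-- B's inner loop: r = nrules; for j, (keywords, _) in enumerate(rules): if any(kw in text …): r = j; break
def pvRuleIdx (t : String) : List (List String × String) → Nat
  | [] => 0
  | (kws, _) :: rest =>
    if kws.any (fun kw => PySem.Str.isIn kw t) then 0 else 1 + pvRuleIdx t rest

-- pages[i] ported as pyGetD pages i "" (same IndexError region as A, excluded by Pre_)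
def generate_cluster_labels_py_alt (pages : List String) (cluster_labels : List Int) : List (Int × String) :=
  let nrules := pvRules.length
  let best := (PySem.List.enumerate cluster_labels).foldl
    (fun (best : PySem.Dict Int Nat) p =>
      if p.2 = -1 then best
      else
        let r := pvRuleIdx (PySem.Str.lower (PySem.List.pyGetD pages p.1 "")) pvRules
        if !(best.contains p.2) || decide (r < best.getD p.2 0) then best.insert p.2 r else best)
    PySem.Dict.empty
  (best.items.foldl
    (fun (d : PySem.Dict Int String) q =>
      d.insert q.1 (if q.2 < nrules then (pvRules.map (fun x => x.2)).getD q.2 "General Notes" else "General Notes"))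
    PySem.Dict.empty).items

-- ===== PRECONDITION & SPEC =====
-- Pre_ excludes exactly the inputs where Python A raises IndexError: a page index beyond len(pages)
-- whose cluster label is not the skipped noise value -1 (B raises there too).
def Pre_generate_cluster_labels_py (pages : List String) (cluster_labels : List Int) : Prop :=
  ∀ x ∈ cluster_labels.drop pages.length, x = -1
instance (pages : List String) (cluster_labels : List Int) : Decidable (Pre_generate_cluster_labels_py pages cluster_labels) := by unfold Pre_generate_cluster_labels_py; infer_instance
def pvWitness_generate_cluster_labels_py : List String × List Int := (["Lab test A", "note"], [0, 1])

def Spec_generate_cluster_labels_py (pages : List String) (cluster_labels : List Int) (out : List (Int × String)) : Prop := out = generate_cluster_labels_py_alt pages cluster_labels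
instance (pages : List String) (cluster_labels : List Int) (out : List (Int × String)) : Decidable (Spec_generate_cluster_labels_py pages cluster_labels out) := by unfold Spec_generate_cluster_labels_py; infer_instance

-- ===== CLAIM (what is proved, stated in full; the proofs are below) =====
def Claim_equal_generate_cluster_labels_py : Prop := ∀ (pages : List String) (cluster_labels : List Int), Dom_generate_cluster_labels_py pages cluster_labels → Pre_generate_cluster_labels_py pages cluster_labels → Spec_generate_cluster_labels_py pages cluster_labels (generate_cluster_labels_py pages cluster_labels)

-- ===== LEMMAS AND PROOFS =====

-- the per-page rule index of B, as a function of an (index, cluster) pair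
def pvRp (pages : List String) (p : Int × Int) : Nat :=
  pvRuleIdx (PySem.Str.lower (PySem.List.pyGetD pages p.1 "")) pvRules

-- minimum rule index over the occurrences of cluster c in ps
def pvMin (pages : List String) (ps : List (Int × Int)) (c : Int) : Nat :=
  (ps.filter (fun p => p.2 == c)).foldl (fun a p => Nat.min a (pvRp pages p)) pvRules.length

lemma ofList_append_singleton (xs : List Int) (x : Int) :
    PySem.Set.ofList (xs ++ [x]) = PySem.Set.add (PySem.Set.ofList xs) x := by
  rw [PySem.Set.ofList_eq_foldl, PySem.Set.ofList_eq_foldl, List.foldl_append, List.foldl_cons, List.foldl_nil]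

lemma pvMin_append (pages : List String) (ps : List (Int × Int)) (p : Int × Int) (c : Int) :
    pvMin pages (ps ++ [p]) c =
      if p.2 == c then Nat.min (pvMin pages ps c) (pvRp pages p) else pvMin pages ps c := by
  unfold pvMin
  rw [List.filter_append]
  by_cases h : p.2 == c
  · simp only [h, if_pos]
    rw [List.filter_cons_of_pos (by simpa using h), List.filter_nil, List.foldl_append,
      List.foldl_cons, List.foldl_nil]
  · simp only [h]
    rw [List.filter_cons_of_neg (by simpa using h), List.filter_nil, List.append_nil]
    simp

lemma pvRuleIdx_le (t : String) (rules : List (List String × String)) :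
    pvRuleIdx t rules ≤ rules.length := by
  induction rules with
  | nil => simp [pvRuleIdx]
  | cons r rest ih =>
    obtain ⟨kws, lbl⟩ := r
    simp only [pvRuleIdx, List.length_cons]
    split <;> omega

lemma foldl_min_le {α : Type} (l : List α) (f : α → Nat) (a : Nat) :
    l.foldl (fun x t => Nat.min x (f t)) a ≤ a := by
  induction l generalizing a with
  | nil => simp
  | cons h t ih => exact le_trans (ih _) (Nat.min_le_left _ _)

lemma foldl_min_zero {α : Type} (l : List α) (f : α → Nat) (a : Nat)
    (h : ∃ t ∈ l, f t = 0) : l.foldl (fun x t => Nat.min x (f t)) a = 0 := by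
  induction l generalizing a with
  | nil => simp at h
  | cons hd t ih =>
    rcases h with ⟨w, hw, hw0⟩
    rcases List.mem_cons.mp hw with rfl | hw'
    · simp only [List.foldl_cons, hw0]
      exact Nat.le_zero.mp (le_trans (foldl_min_le t f (Nat.min a 0)) (Nat.min_le_right a 0))
    · exact ih _ ⟨w, hw', hw0⟩

lemma foldl_min_succ {α : Type} (l : List α) (f : α → Nat) (a : Nat) :
    l.foldl (fun x t => Nat.min x (1 + f t)) (1 + a) = 1 + l.foldl (fun x t => Nat.min x (f t)) a := by
  induction l generalizing a with
  | nil => simp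
  | cons hd t ih =>
    simp only [List.foldl_cons]
    have h1 : Nat.min (1 + a) (1 + f hd) = 1 + Nat.min a (f hd) := Nat.add_min_add_left ..
    rw [h1, ih]

-- A's break-at-first-rule loop equals "name of the minimum per-text rule index"
lemma firstLabel_eq (rules : List (List String × String)) (texts : List String) :
    pvFirstLabel rules texts =
      (if texts.foldl (fun a t => Nat.min a (pvRuleIdx (PySem.Str.lower t) rules)) rules.length < rules.length
       then (rules.map (fun x => x.2)).getD (texts.foldl (fun a t => Nat.min a (pvRuleIdx (PySem.Str.lower t) rules)) rules.length) "General Notes"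
       else "General Notes") := by
  induction rules with
  | nil =>
    simp [pvFirstLabel]
  | cons r rest ih =>
    obtain ⟨kws, lbl⟩ := r
    by_cases hmatch : texts.any (fun t => kws.any (fun kw => PySem.Str.isIn kw (PySem.Str.lower t))) = true
    · have h0 : texts.foldl (fun a t => Nat.min a (pvRuleIdx (PySem.Str.lower t) ((kws, lbl) :: rest))) ((kws, lbl) :: rest).length = 0 := by
        rcases List.any_eq_true.mp hmatch with ⟨t0, ht0, hm⟩
        exact foldl_min_zero texts _ _ ⟨t0, ht0, by simp only [pvRuleIdx, hm, if_true]⟩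
      rw [show pvFirstLabel ((kws, lbl) :: rest) texts = lbl from by
        simp only [pvFirstLabel]; rw [if_pos hmatch], h0]
      simp
    · have hnone : ∀ t ∈ texts, pvRuleIdx (PySem.Str.lower t) ((kws, lbl) :: rest) = 1 + pvRuleIdx (PySem.Str.lower t) rest := by
        intro t ht
        have hnc : ¬ kws.any (fun kw => PySem.Str.isIn kw (PySem.Str.lower t)) = true := by
          intro hc; exact hmatch (List.any_eq_true.mpr ⟨t, ht, hc⟩)
        simp only [pvRuleIdx]; rw [if_neg hnc]
      have hfold : texts.foldl (fun a t => Nat.min a (pvRuleIdx (PySem.Str.lower t) ((kws, lbl) :: rest))) ((kws, lbl) :: rest).length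
          = 1 + texts.foldl (fun a t => Nat.min a (pvRuleIdx (PySem.Str.lower t) rest)) rest.length := by
        have hcongr : texts.foldl (fun a t => Nat.min a (pvRuleIdx (PySem.Str.lower t) ((kws, lbl) :: rest))) (1 + rest.length)
            = texts.foldl (fun a t => Nat.min a (1 + pvRuleIdx (PySem.Str.lower t) rest)) (1 + rest.length) :=
          PySem.List.foldl_congr_mem _ _ _ _ (by intro acc x hx; rw [hnone x hx])
        simp only [List.length_cons]
        rw [show rest.length + 1 = 1 + rest.length by omega, hcongr, foldl_min_succ]
      have hstep : pvFirstLabel ((kws, lbl) :: rest) texts = pvFirstLabel rest texts := by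
        simp only [pvFirstLabel]; rw [if_neg hmatch]
      rw [hstep, ih, hfold]
      set m := texts.foldl (fun a t => Nat.min a (pvRuleIdx (PySem.Str.lower t) rest)) rest.length with hm
      by_cases hlt : m < rest.length
      · rw [if_pos hlt, if_pos (by simp only [List.length_cons]; omega)]
        simp only [List.map_cons]
        rw [show 1 + m = m + 1 from Nat.add_comm 1 m, List.getD_cons_succ]
      · rw [if_neg hlt, if_neg (by simp only [List.length_cons]; omega)]

-- B's single pass builds exactly { c ↦ min rule index } over first-occurrence order of the non-noise clusters
lemma alt_invariant (pages : List String) (ps : List (Int × Int)) :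
    (ps.foldl
      (fun (best : PySem.Dict Int Nat) p =>
        if p.2 = -1 then best
        else
          if !(best.contains p.2) || decide (pvRuleIdx (PySem.Str.lower (PySem.List.pyGetD pages p.1 "")) pvRules < best.getD p.2 0) then best.insert p.2 (pvRuleIdx (PySem.Str.lower (PySem.List.pyGetD pages p.1 "")) pvRules) else best)
      PySem.Dict.empty).items
    = ((PySem.Set.ofList (ps.map (fun p => p.2))).filter (fun c => !(c == -1))).map
        (fun c => (c, pvMin pages ps c)) := by
  induction ps using List.reverseRecOn with
  | nil => rfl
  | append_singleton ps p ih =>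
    rw [List.foldl_append, List.foldl_cons, List.foldl_nil, List.map_append, List.map_cons,
      List.map_nil, ofList_append_singleton]
    by_cases hc : p.2 = -1
    · rw [if_pos hc]
      have hfil : (PySem.Set.add (PySem.Set.ofList (ps.map (fun p => p.2))) p.2).filter (fun c => !(c == -1))
          = (PySem.Set.ofList (ps.map (fun p => p.2))).filter (fun c => !(c == -1)) := by
        simp only [PySem.Set.add]
        split
        · rfl
        · rw [List.filter_append]
          simp [hc]
      rw [hfil, ih]
      apply List.map_congr_left
      intro c' hc'
      have hne : ¬ (c' = -1) := by
        have := (List.mem_filter.mp hc').2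
        simpa using this
      rw [pvMin_append, if_neg (by simp [hc]; omega)]
    · rw [if_neg hc]
      have hSnodup : ((PySem.Set.ofList (ps.map (fun p => p.2))).filter (fun c => !(c == -1))).Nodup :=
        (PySem.Set.nodup_ofList _).filter _
      have hkeys : (ps.foldl
          (fun (best : PySem.Dict Int Nat) p =>
            if p.2 = -1 then best
            else
              if !(best.contains p.2) || decide (pvRuleIdx (PySem.Str.lower (PySem.List.pyGetD pages p.1 "")) pvRules < best.getD p.2 0) then best.insert p.2 (pvRuleIdx (PySem.Str.lower (PySem.List.pyGetD pages p.1 "")) pvRules) else best)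
          PySem.Dict.empty).keys
          = (PySem.Set.ofList (ps.map (fun p => p.2))).filter (fun c => !(c == -1)) := by
        simp only [PySem.Dict.keys]
        rw [ih]
        simp [Function.comp_def]
      have hmemS : p.2 ∈ (PySem.Set.ofList (ps.map (fun p => p.2))).filter (fun c => !(c == -1))
          ↔ p.2 ∈ ps.map (fun p => p.2) := by
        constructor
        · intro h; exact (PySem.Set.mem_ofList _ _).mp (List.mem_filter.mp h).1
        · intro h; exact List.mem_filter.mpr ⟨(PySem.Set.mem_ofList _ _).mpr h, by simp [hc]⟩
      by_cases hmem : p.2 ∈ ps.map (fun p => p.2)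
      · -- cluster already seen: the key list is unchanged, only its value may shrink
        have hadd : PySem.Set.add (PySem.Set.ofList (ps.map (fun p => p.2))) p.2
            = PySem.Set.ofList (ps.map (fun p => p.2)) := by
          have hcon : (PySem.Set.ofList (ps.map (fun p => p.2))).contains p.2 = true :=
            (PySem.Set.contains_iff _ _).mpr ((PySem.Set.mem_ofList _ _).mpr hmem)
          unfold PySem.Set.add
          rw [hcon]
          simp
        have hconD : (ps.foldl
            (fun (best : PySem.Dict Int Nat) p =>
              if p.2 = -1 then best
              else
                if !(best.contains p.2) || decide (pvRuleIdx (PySem.Str.lower (PySem.List.pyGetD pages p.1 "")) pvRules < best.getD p.2 0) then best.insert p.2 (pvRuleIdx (PySem.Str.lower (PySem.List.pyGetD pages p.1 "")) pvRules) else best)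
            PySem.Dict.empty).contains p.2 = true := by
          rw [PySem.Dict.contains_eq_decide_mem_keys, hkeys]
          simp [hmemS.mpr hmem]
        have hpair : (p.2, pvMin pages ps p.2) ∈ (ps.foldl
            (fun (best : PySem.Dict Int Nat) p =>
              if p.2 = -1 then best
              else
                if !(best.contains p.2) || decide (pvRuleIdx (PySem.Str.lower (PySem.List.pyGetD pages p.1 "")) pvRules < best.getD p.2 0) then best.insert p.2 (pvRuleIdx (PySem.Str.lower (PySem.List.pyGetD pages p.1 "")) pvRules) else best)
            PySem.Dict.empty).items := by
          rw [ih]; exact List.mem_map_of_mem (hmemS.mpr hmem)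
        have hnodupK : (ps.foldl
            (fun (best : PySem.Dict Int Nat) p =>
              if p.2 = -1 then best
              else
                if !(best.contains p.2) || decide (pvRuleIdx (PySem.Str.lower (PySem.List.pyGetD pages p.1 "")) pvRules < best.getD p.2 0) then best.insert p.2 (pvRuleIdx (PySem.Str.lower (PySem.List.pyGetD pages p.1 "")) pvRules) else best)
            PySem.Dict.empty).keys.Nodup := by rw [hkeys]; exact hSnodup
        have hgetD : (ps.foldl
            (fun (best : PySem.Dict Int Nat) p =>
              if p.2 = -1 then best
              else
                if !(best.contains p.2) || decide (pvRuleIdx (PySem.Str.lower (PySem.List.pyGetD pages p.1 "")) pvRules < best.getD p.2 0) then best.insert p.2 (pvRuleIdx (PySem.Str.lower (PySem.List.pyGetD pages p.1 "")) pvRules) else best)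
            PySem.Dict.empty).getD p.2 0 = pvMin pages ps p.2 :=
          PySem.Dict.getD_of_get?_eq_some _ _ (PySem.Dict.get?_of_mem_items _ hpair hnodupK)
        rw [hadd, hconD, hgetD]
        by_cases hlt : pvRuleIdx (PySem.Str.lower (PySem.List.pyGetD pages p.1 "")) pvRules < pvMin pages ps p.2
        · rw [if_pos (by simp [hlt]), PySem.Dict.items_insert_of_contains _ _ hconD, ih, List.map_map]
          apply List.map_congr_left
          intro c' hc'
          simp only [Function.comp_def]
          rw [pvMin_append]
          by_cases he : c' = p.2
          · subst he
            simp [pvRp, Nat.min_eq_right hlt.le]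
          · have h1 : (p.2 == c') = false := by simp; omega
            have h2 : (c' == p.2) = false := by simp; omega
            simp [h1, h2]
        · rw [if_neg (by simp [hlt]), ih]
          apply List.map_congr_left
          intro c' hc'
          rw [pvMin_append]
          by_cases he : c' = p.2
          · subst he
            simp [pvRp, Nat.min_eq_left (Nat.le_of_not_lt hlt)]
          · have h1 : (p.2 == c') = false := by simp; omega
            simp [h1]
      · -- fresh cluster: appended at the end with its own rule index
        have hconD : (ps.foldl
            (fun (best : PySem.Dict Int Nat) p =>
              if p.2 = -1 then best
              else
                if !(best.contains p.2) || decide (pvRuleIdx (PySem.Str.lower (PySem.List.pyGetD pages p.1 "")) pvRules < best.getD p.2 0) then best.insert p.2 (pvRuleIdx (PySem.Str.lower (PySem.List.pyGetD pages p.1 "")) pvRules) else best)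
            PySem.Dict.empty).contains p.2 = false := by
          rw [PySem.Dict.contains_eq_decide_mem_keys, hkeys]
          simp only [decide_eq_false_iff_not]
          intro hcon
          exact hmem (hmemS.mp hcon)
        have hadd : PySem.Set.add (PySem.Set.ofList (ps.map (fun p => p.2))) p.2
            = PySem.Set.ofList (ps.map (fun p => p.2)) ++ [p.2] := by
          have hcon : (PySem.Set.ofList (ps.map (fun p => p.2))).contains p.2 = false := by
            rw [← Bool.not_eq_true, PySem.Set.contains_iff]
            intro hcon
            exact hmem ((PySem.Set.mem_ofList _ _).mp hcon)
          unfold PySem.Set.add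
          rw [hcon]
          simp
        rw [hconD, if_pos (by simp), PySem.Dict.items_insert_of_not_contains _ _ hconD, ih, hadd,
          List.filter_append, List.filter_cons_of_pos (by simp [hc]), List.filter_nil, List.map_append,
          List.map_cons, List.map_nil]
        congr 1
        · apply List.map_congr_left
          intro c' hc'
          rw [pvMin_append]
          have he : ¬ (c' = p.2) := by
            intro he; subst he; exact hmem (hmemS.mp hc')
          have h1 : (p.2 == c') = false := by simp; omega
          simp [h1]
        · have hfil : ps.filter (fun q => q.2 == p.2) = [] := by
            apply List.filter_eq_nil_iff.mpr
            intro q hq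
            simp only [beq_iff_eq]
            intro he
            exact hmem (List.mem_map.mpr ⟨q, hq, he⟩)
          have hbase : pvMin pages ps p.2 = pvRules.length := by
            unfold pvMin
            rw [hfil, List.foldl_nil]
          rw [pvMin_append, if_pos (by simp), hbase]
          have hle := pvRuleIdx_le (PySem.Str.lower (PySem.List.pyGetD pages p.1 "")) pvRules
          simp [pvRp, Nat.min_eq_right hle]

-- A's 'if cluster_id == -1: continue' loop is the same fold over the filtered set
lemma foldl_skip {β : Type} (g : β → Int → β) (l : List Int) (init : β) :
    l.foldl (fun d x => if x = -1 then d else g d x) init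
      = (l.filter (fun c => !(c == -1))).foldl g init := by
  induction l generalizing init with
  | nil => rfl
  | cons h t ih =>
    by_cases hh : h = -1
    · simp [hh, ih]
    · simp [hh, ih]

-- ===== VERDICT (by name: the statement is the Claim_ definition above) =====
theorem generate_cluster_labels_py_spec : Claim_equal_generate_cluster_labels_py := by
  intro pages cluster_labels _hdom _hpre
  unfold Spec_generate_cluster_labels_py
  simp only [generate_cluster_labels_py, generate_cluster_labels_py_alt]
  rw [foldl_skip]
  have hSnodup : ((PySem.Set.ofList cluster_labels).filter (fun c => !(c == -1))).Nodup :=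
    (PySem.Set.nodup_ofList _).filter _
  rw [PySem.Dict.items_foldl_insert_fresh _ (fun a => a) _ PySem.Dict.empty
      (by intro a _; simp) (by simpa using hSnodup)]
  have hB := alt_invariant pages (PySem.List.enumerate cluster_labels)
  rw [hB]
  have h2 : (List.map (fun (q : Int × Nat) => q.1)
      (List.map (fun c => (c, pvMin pages (PySem.List.enumerate cluster_labels) c))
        (List.filter (fun c => !(c == -1))
          (PySem.Set.ofList (List.map (fun (p : Int × Int) => p.2) (PySem.List.enumerate cluster_labels)))))).Nodup := by
    rw [List.map_map]
    simp only [Function.comp_def]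
    rw [PySem.List.map_snd_enumerate]
    simpa using hSnodup
  rw [PySem.Dict.items_foldl_insert_fresh
      (List.map (fun c => (c, pvMin pages (PySem.List.enumerate cluster_labels) c))
        (List.filter (fun c => !(c == -1))
          (PySem.Set.ofList (List.map (fun (p : Int × Int) => p.2) (PySem.List.enumerate cluster_labels)))))
      (fun q => q.1)
      (fun q => if q.2 < pvRules.length then (List.map (fun x => x.2) pvRules).getD q.2 "General Notes" else "General Notes")
      PySem.Dict.empty
      (by intro a _; simp) h2]
  rw [List.map_map, PySem.List.map_snd_enumerate]
  simp only [Function.comp_def]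
  apply List.map_congr_left
  intro c hcS
  rw [firstLabel_eq, List.foldl_map]
  rfl
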